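-- pv_equiv track=rewrite | github.com/allenporter/python-google-nest-sdm | google_nest_sdm/webrtc_util.py | update_direction_in_answer
-- ===== SOURCE A (Python) =====
-- def update_direction_in_answer(answer_sdp, kind, old_direction, new_direction):
--     """
--     Updates the direction of a specific media track in the SDP answer if it matches a certain direction.
--
--     Args:
--         answer_sdp (str): The SDP answer in string format.
--         kind (str): The kind of media track to update ('audio' or 'video').
--         old_direction (str): The old direction to find ('sendrecv', 'sendonly', 'recvonly', 'inactive').
--         new_direction (str): The new direction to set ('sendrecv', 'sendonly', 'recvonly', 'inactive').
--
--     Returns: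
--         str: The updated SDP with the new direction.
--     """
--
--     # Update the SDP
--     sdp_lines = answer_sdp.split('\r\n')
--     updated_sdp_lines = []
--     in_media_section = False
--
--     for line in sdp_lines:
--         if line.startswith('m='):
--             in_media_section = (kind in line)
--         if in_media_section and line.startswith('a='):
--             # Update the direction line if it matches the kind
--             if line.startswith(f'a={old_direction}'):
--                 updated_sdp_lines.append(f'a={new_direction}')
--                 continue
--         updated_sdp_lines.append(line)
--
--     updated_sdp = '\r\n'.join(updated_sdp_lines)
--     return updated_sdp
-- ===== SOURCE B (Python) =====
-- def update_direction_in_answer(answer_sdp, kind, old_direction, new_direction):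
--     """Segment-based rewrite: split into preamble + one segment per 'm=' line,
--     rewrite matching 'a=' direction lines only inside active segments."""
--     lines = answer_sdp.split('\r\n')
--     out = []
--     i = 0
--     # preamble: everything before the first 'm=' line is emitted verbatim
--     while i < len(lines) and not lines[i].startswith('m='):
--         out.append(lines[i])
--         i += 1
--     prefix = 'a=' + old_direction
--     repl = 'a=' + new_direction
--     # one segment per 'm=' header line
--     while i < len(lines):
--         header = lines[i]
--         j = i + 1
--         while j < len(lines) and not lines[j].startswith('m='):
--             j += 1
--         body = lines[i + 1:j]
--         out.append(header)
--         if kind in header: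
--             out.extend(repl if l.startswith(prefix) else l for l in body)
--         else:
--             out.extend(body)
--         i = j
--     return '\r\n'.join(out)
-- ===== Notes on version B (the rewrite author's own statement) =====
-- stated objective: alternative
-- what changed: Replaces A's per-line state-machine loop (a boolean in_media_section threaded through every line) with a two-level decomposition: split into a preamble plus one segment per 'm=' header, decide activity once per segment, and map the replacement over the segment body.
import Mathlib
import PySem

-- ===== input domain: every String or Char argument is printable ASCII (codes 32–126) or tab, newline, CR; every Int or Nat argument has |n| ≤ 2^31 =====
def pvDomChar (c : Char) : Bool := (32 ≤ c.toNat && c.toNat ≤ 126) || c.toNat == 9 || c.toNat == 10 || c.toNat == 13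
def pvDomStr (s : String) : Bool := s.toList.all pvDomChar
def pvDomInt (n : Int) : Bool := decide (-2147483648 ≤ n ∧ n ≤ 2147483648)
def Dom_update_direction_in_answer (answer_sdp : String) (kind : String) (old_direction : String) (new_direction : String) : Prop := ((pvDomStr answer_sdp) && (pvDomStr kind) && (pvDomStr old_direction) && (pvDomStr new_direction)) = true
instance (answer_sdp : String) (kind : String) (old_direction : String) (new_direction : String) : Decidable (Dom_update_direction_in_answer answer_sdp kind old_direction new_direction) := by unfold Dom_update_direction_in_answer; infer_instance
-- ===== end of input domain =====

-- B replaces A's per-line state-machine loop (an in_media_section flag threaded through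
-- every line) with a segment decomposition: preamble + one segment per 'm=' header line,
-- activity decided once per segment, replacement mapped over the segment body (alternative).

-- ===== PORT A =====
-- the assignment `in_media_section = (kind in line) if line.startswith('m=')` of A's loop
def pvNextIm (kind line : String) (in_media_section : Bool) : Bool :=
  if PySem.Str.startswith line "m=" then PySem.Str.isIn kind line else in_media_section

-- A's for-loop over the lines with its state (in_media_section, accumulated output)
def pvALoop (kind old_direction new_direction : String) (in_media_section : Bool) :
    List String → List String
  | [] => []
  | line :: rest =>
    if pvNextIm kind line in_media_section && PySem.Str.startswith line "a=" then
      if PySem.Str.startswith line ("a=" ++ old_direction) then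
        ("a=" ++ new_direction) ::
          pvALoop kind old_direction new_direction (pvNextIm kind line in_media_section) rest
      else line :: pvALoop kind old_direction new_direction (pvNextIm kind line in_media_section) rest
    else line :: pvALoop kind old_direction new_direction (pvNextIm kind line in_media_section) rest

def update_direction_in_answer (answer_sdp : String) (kind : String) (old_direction : String) (new_direction : String) : String :=
  let sdp_lines := (PySem.Str.split? answer_sdp "\r\n").getD []   -- sep "\r\n" ≠ "": split? is always some
  PySem.Str.join "\r\n" (pvALoop kind old_direction new_direction false sdp_lines)

-- ===== PORT B =====
-- Source B's per-line replacement inside an active media segment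
def pvRepl (old_direction new_direction : String) (l : String) : String :=
  if PySem.Str.startswith l ("a=" ++ old_direction) then "a=" ++ new_direction else l

-- Source B's outer while loop: lines[i+1:j] is the takeWhile of non-'m=' lines after the
-- header, the remainder from j the dropWhile (the inner scan to the next 'm=' line)
def pvBGo (kind old_direction new_direction : String) : List String → List String
  | [] => []
  | l :: rest =>
    if PySem.Str.startswith l "m=" then
      (if PySem.Str.isIn kind l then
        l :: (rest.takeWhile (fun x => !PySem.Str.startswith x "m=")).map
              (pvRepl old_direction new_direction)
       else l :: rest.takeWhile (fun x => !PySem.Str.startswith x "m=")) ++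
      pvBGo kind old_direction new_direction (rest.dropWhile (fun x => !PySem.Str.startswith x "m="))
    else l :: pvBGo kind old_direction new_direction rest
termination_by lines => lines.length
decreasing_by
  · simp only [List.length_cons]
    have := List.length_dropWhile_le (fun x => !PySem.Str.startswith x "m=") rest
    omega
  · simp only [List.length_cons]; omega

def update_direction_in_answer_alt (answer_sdp : String) (kind : String) (old_direction : String) (new_direction : String) : String :=
  let lines := (PySem.Str.split? answer_sdp "\r\n").getD []   -- sep "\r\n" ≠ "": split? is always some
  PySem.Str.join "\r\n" (pvBGo kind old_direction new_direction lines)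

-- ===== PRECONDITION & SPEC =====
def Spec_update_direction_in_answer (answer_sdp : String) (kind : String) (old_direction : String) (new_direction : String) (out : String) : Prop := out = update_direction_in_answer_alt answer_sdp kind old_direction new_direction
instance (answer_sdp : String) (kind : String) (old_direction : String) (new_direction : String) (out : String) : Decidable (Spec_update_direction_in_answer answer_sdp kind old_direction new_direction out) := by unfold Spec_update_direction_in_answer; infer_instance

-- ===== CLAIM (what is proved, stated in full; the proofs are below) =====
def Claim_equal_update_direction_in_answer : Prop := ∀ (answer_sdp : String) (kind : String) (old_direction : String) (new_direction : String), Dom_update_direction_in_answer answer_sdp kind old_direction new_direction → Spec_update_direction_in_answer answer_sdp kind old_direction new_direction (update_direction_in_answer answer_sdp kind old_direction new_direction)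

-- ===== LEMMAS AND PROOFS =====

-- a line starting with "m=" does not start with "a=" ++ s (first characters differ)
theorem pv_m_not_a (l s : String) (h : PySem.Str.startswith l "m=" = true) :
    PySem.Str.startswith l ("a=" ++ s) = false := by
  simp only [PySem.Str.startswith_eq] at h ⊢
  rw [PySem.Chars.startswith_iff] at h
  rw [Bool.eq_false_iff]
  intro hc
  rw [PySem.Chars.startswith_iff] at hc
  obtain ⟨t1, ht1⟩ := h
  obtain ⟨t2, ht2⟩ := hc
  have e1 : "m=".toList = ['m', '='] := rfl
  have e2 : ("a=" ++ s).toList = 'a' :: '=' :: s.toList := by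
    rw [String.toList_append]
    rfl
  rw [e1] at ht1
  rw [e2] at ht2
  have heq := ht1.trans ht2.symm
  simp only [List.cons_append] at heq
  injection heq with h1 _
  exact absurd h1 (by decide)

-- a line starting with "m=" does not start with "a="
theorem pv_m_not_a2 (l : String) (h : PySem.Str.startswith l "m=" = true) :
    PySem.Str.startswith l "a=" = false := by
  have := pv_m_not_a l "" h
  simpa using this

-- startswith ("a=" ++ old) implies startswith "a="
theorem pv_a_of_aold (l s : String) (h : PySem.Str.startswith l ("a=" ++ s) = true) :
    PySem.Str.startswith l "a=" = true := by
  simp only [PySem.Str.startswith_eq] at h ⊢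
  rw [PySem.Chars.startswith_iff] at h ⊢
  refine List.IsPrefix.trans ?_ h
  simp [String.toList_append]

-- over a block of non-'m=' lines, A's loop keeps its flag and maps pvRepl when active
theorem pvALoop_seg (kind old new : String) (b : Bool) (seg rest : List String)
    (hseg : ∀ x ∈ seg, PySem.Str.startswith x "m=" = false) :
    pvALoop kind old new b (seg ++ rest)
      = (if b then seg.map (pvRepl old new) else seg) ++ pvALoop kind old new b rest := by
  induction seg with
  | nil => cases b <;> simp
  | cons x xs ih =>
    have hx : PySem.Str.startswith x "m=" = false := hseg x (by simp)
    have ihs : ∀ y ∈ xs, PySem.Str.startswith y "m=" = false :=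
      fun y hy => hseg y (by simp [hy])
    have him : pvNextIm kind x b = b := by
      simp only [pvNextIm, hx, Bool.false_eq_true, if_false]
    cases b with
    | false =>
      simp only [List.cons_append, pvALoop, him, Bool.false_and, Bool.false_eq_true, if_false,
        ih ihs]
    | true =>
      by_cases hao : PySem.Str.startswith x ("a=" ++ old) = true
      · have ha := pv_a_of_aold x old hao
        simp only [List.cons_append, pvALoop, him, ha, Bool.true_and, hao, ih ihs,
          if_pos, List.map_cons, pvRepl]
      · rw [Bool.not_eq_true] at hao
        simp only [List.cons_append, pvALoop, him, hao, Bool.false_eq_true, if_false, ih ihs,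
          if_true, List.map_cons, pvRepl, ite_self]

-- when the head line is an 'm=' line, A's loop ignores the incoming flag
theorem pvALoop_m_head (kind old new : String) (b : Bool) (l : String) (rest : List String)
    (h : PySem.Str.startswith l "m=" = true) :
    pvALoop kind old new b (l :: rest) = pvALoop kind old new false (l :: rest) := by
  simp only [pvALoop, pvNextIm, h, if_true]

-- main invariant: A's loop started with flag false computes B's segment traversal
theorem pvALoop_eq_pvBGo (kind old new : String) (lines : List String) :
    pvALoop kind old new false lines = pvBGo kind old new lines := by
  induction hn : lines.length using Nat.strong_induction_on generalizing lines with
  | _ n ih =>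
  subst hn
  match lines with
  | [] => simp [pvALoop, pvBGo]
  | l :: rest =>
    by_cases hm : PySem.Str.startswith l "m=" = true
    · have ha2 : PySem.Str.startswith l "a=" = false := pv_m_not_a2 l hm
      have him : pvNextIm kind l false = PySem.Str.isIn kind l := by
        simp only [pvNextIm, hm, if_true]
      have hsplit : rest.takeWhile (fun x => !PySem.Str.startswith x "m=")
          ++ rest.dropWhile (fun x => !PySem.Str.startswith x "m=") = rest :=
        List.takeWhile_append_dropWhile
      have hseg : ∀ x ∈ rest.takeWhile (fun x => !PySem.Str.startswith x "m="),
          PySem.Str.startswith x "m=" = false := by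
        intro x hx
        have := List.mem_takeWhile_imp hx
        simpa using this
      have hlen := List.length_dropWhile_le (fun x => !PySem.Str.startswith x "m=") rest
      have hrec : pvALoop kind old new (PySem.Str.isIn kind l)
            (rest.dropWhile (fun x => !PySem.Str.startswith x "m="))
          = pvBGo kind old new (rest.dropWhile (fun x => !PySem.Str.startswith x "m=")) := by
        cases hr : rest.dropWhile (fun x => !PySem.Str.startswith x "m=") with
        | nil => simp [pvALoop, pvBGo]
        | cons m rr =>
          have hd := List.head?_dropWhile_not (fun x => !PySem.Str.startswith x "m=") rest
          rw [hr] at hd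
          have h2 : (!PySem.Str.startswith m "m=") = false := hd
          have hm2 : PySem.Str.startswith m "m=" = true := by
            cases hb : PySem.Str.startswith m "m="
            · rw [hb] at h2; simp at h2
            · rfl
          rw [pvALoop_m_head kind old new _ m rr hm2]
          refine ih (m :: rr).length ?_ _ rfl
          rw [hr] at hlen
          simp only [List.length_cons] at hlen ⊢
          omega
      conv_lhs => rw [pvALoop]
      rw [pvBGo]
      simp only [him, ha2, Bool.and_false, Bool.false_eq_true, if_false, hm, if_true]
      conv_lhs => rw [← hsplit]
      rw [pvALoop_seg kind old new _ _ _ hseg, hrec]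
      cases hk : PySem.Str.isIn kind l <;> simp
    · rw [Bool.not_eq_true] at hm
      have him : pvNextIm kind l false = false := by
        simp only [pvNextIm, hm, Bool.false_eq_true, if_false]
      rw [pvALoop, pvBGo]
      simp only [him, hm, Bool.false_and, Bool.false_eq_true, if_false,
        ih rest.length (by simp) rest rfl]

-- ===== VERDICT (by name: the statement is the Claim_ definition above) =====
theorem update_direction_in_answer_spec : Claim_equal_update_direction_in_answer := by
  intro answer_sdp kind old_direction new_direction _
  unfold Spec_update_direction_in_answer update_direction_in_answer update_direction_in_answer_alt
  simp only [pvALoop_eq_pvBGo]
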